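-- pv_equiv track=rewrite | github.com/kehiy/python-sdk | pactus/crypto/bls/bls12_381/fields.py | sgn0
-- ===== SOURCE A (Python) =====
-- def sgn0(x):
--     sign = 0
--     zero = 1
--     for xi in x:
--         sign_i = xi % 2
--         zero_i = xi == 0
--         sign = sign | (zero & sign_i)
--         zero = zero & zero_i
--     return 1 - 2 * sign
-- ===== SOURCE B (Python) =====
-- def sgn0(x):
--     for xi in x:
--         if xi != 0:
--             return 1 - 2 * (xi % 2)
--     return 1
-- ===== Notes on version B (the rewrite author's own statement) =====
-- stated objective: simpler
-- what changed: Replaces the branchless two-accumulator bitwise fold (sign, zero) over the whole list with an early-exit search for the first nonzero component, returning its parity sign directly (1 if all components are zero).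
import Mathlib
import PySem

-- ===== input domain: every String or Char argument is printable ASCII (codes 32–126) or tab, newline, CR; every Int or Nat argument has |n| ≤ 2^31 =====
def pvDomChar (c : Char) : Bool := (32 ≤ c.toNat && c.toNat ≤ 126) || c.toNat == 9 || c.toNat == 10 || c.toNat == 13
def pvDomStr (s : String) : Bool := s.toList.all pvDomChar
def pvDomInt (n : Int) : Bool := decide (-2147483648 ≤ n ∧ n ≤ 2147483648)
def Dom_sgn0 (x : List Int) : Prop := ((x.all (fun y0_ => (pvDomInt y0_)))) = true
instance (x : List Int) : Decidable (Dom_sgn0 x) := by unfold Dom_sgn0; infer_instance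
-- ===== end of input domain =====

-- B replaces A's branchless two-accumulator bitwise fold with an early-exit scan for the first nonzero component (simpler; same return values).


-- ===== PORT A =====
-- A's fold body: one step of the loop
def sgn0Step (st : Int × Int) (xi : Int) : Int × Int :=
  let sign_i := PySem.Int.mod xi 2
  let zero_i : Int := if xi = 0 then 1 else 0
  (Int.lor st.1 (Int.land st.2 sign_i), Int.land st.2 zero_i)

def sgn0 (x : List Int) : Int :=
  let st := x.foldl sgn0Step (0, 1)
  1 - 2 * st.1

-- ===== PORT B =====
-- B: early-exit search for the first nonzero component
def sgn0_alt (x : List Int) : Int :=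
  match x with
  | [] => 1
  | xi :: rest => if xi ≠ 0 then 1 - 2 * PySem.Int.mod xi 2 else sgn0_alt rest

-- ===== PRECONDITION & SPEC =====
def Spec_sgn0 (x : List Int) (out : Int) : Prop := out = sgn0_alt x
instance (x : List Int) (out : Int) : Decidable (Spec_sgn0 x out) := by unfold Spec_sgn0; infer_instance

-- ===== CLAIM (what is proved, stated in full; the proofs are below) =====
def Claim_equal_sgn0 : Prop := ∀ (x : List Int), Dom_sgn0 x → Spec_sgn0 x (sgn0 x)

-- ===== LEMMAS AND PROOFS =====

theorem sgn0_zero_land (x : Int) : Int.land 0 x = 0 := by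
  cases x <;> simp [Int.land, Nat.ldiff]

theorem sgn0_lor_zero (x : Int) : Int.lor x 0 = x := by
  cases x <;> simp [Int.lor, Nat.ldiff]

theorem sgn0_mod_two_cases (xi : Int) : PySem.Int.mod xi 2 = 0 ∨ PySem.Int.mod xi 2 = 1 := by
  rw [PySem.Int.mod_eq_emod_of_pos (by norm_num : (0:Int) < 2)]
  omega

-- once the `zero` accumulator is 0, the fold state is frozen
theorem sgn0_foldl_frozen (l : List Int) (s : Int) :
    l.foldl sgn0Step (s, 0) = (s, 0) := by
  induction l with
  | nil => rfl
  | cons xi rest ih =>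
      simp only [List.foldl_cons, sgn0Step, sgn0_zero_land, sgn0_lor_zero]
      exact ih

theorem sgn0_eq_alt (x : List Int) : sgn0 x = sgn0_alt x := by
  induction x with
  | nil => rfl
  | cons xi rest ih =>
      by_cases h : xi = 0
      · subst h
        have hstep : sgn0Step (0, 1) 0 = (0, 1) := by decide
        simp only [sgn0, sgn0_alt, List.foldl_cons, hstep] at *
        simpa using ih
      · have hm := sgn0_mod_two_cases xi
        have hstep : sgn0Step (0, 1) xi = (PySem.Int.mod xi 2, 0) := by
          simp only [sgn0Step, if_neg h]
          rcases hm with hm | hm <;> rw [hm] <;> decide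
        simp only [sgn0, sgn0_alt, List.foldl_cons, hstep, sgn0_foldl_frozen,
          if_pos (by exact h : xi ≠ 0)]

-- ===== VERDICT (by name: the statement is the Claim_ definition above) =====
theorem sgn0_spec : Claim_equal_sgn0 := by
  intro x _
  exact sgn0_eq_alt x
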